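-- pv_equiv track=rewrite | github.com/buaii/Problem-Solve | 백준/Bronze/8958. OX퀴즈/OX퀴즈.py | check
-- ===== SOURCE A (Python) =====
-- def check(s):
-- 	pre = False
-- 	ans = 0
-- 	count = 0
-- 	for i in s:
-- 		if not pre:
-- 			if i == "O":
-- 				pre = True
-- 				count += 1
-- 				ans += count
-- 		else:
-- 			if i == "O":
-- 				count += 1
-- 				ans += count
-- 			else:
-- 				count = 0
-- 	return ans
-- ===== SOURCE B (Python) =====
-- def check(s):
--     # run-length encode the maximal "O" runs, then sum closed-form triangular scores
--     runs = []
--     cur = 0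
--     for i in s:
--         if i == "O":
--             cur += 1
--         elif cur:
--             runs.append(cur)
--             cur = 0
--     if cur:
--         runs.append(cur)
--     return sum(L * (L + 1) // 2 for L in runs)
-- ===== Notes on version B (the rewrite author's own statement) =====
-- stated objective: alternative
-- what changed: B run-length encodes the maximal runs of the winning character and sums the closed-form triangular number L*(L+1)//2 per run, instead of the original per-character running accumulator with its redundant boolean flag.
import Mathlib
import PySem

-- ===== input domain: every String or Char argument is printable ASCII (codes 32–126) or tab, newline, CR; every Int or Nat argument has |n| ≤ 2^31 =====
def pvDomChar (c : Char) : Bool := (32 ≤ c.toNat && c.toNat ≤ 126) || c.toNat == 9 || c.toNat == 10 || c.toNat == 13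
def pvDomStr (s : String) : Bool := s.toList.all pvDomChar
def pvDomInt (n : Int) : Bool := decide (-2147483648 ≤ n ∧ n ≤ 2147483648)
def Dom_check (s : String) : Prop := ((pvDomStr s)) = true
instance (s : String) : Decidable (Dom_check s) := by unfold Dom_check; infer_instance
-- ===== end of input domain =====

-- B scores each maximal run of 'O' by the closed-form triangular number instead of A's per-character accumulator.

-- ===== PORT A =====
-- state: (pre, ans, count)
def checkStep (st : Bool × Int × Int) (i : Char) : Bool × Int × Int :=
  match st with
  | (pre, ans, count) =>
    if !pre then
      if i = 'O' then (true, ans + (count + 1), count + 1) else (pre, ans, count)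
    else
      if i = 'O' then (pre, ans + (count + 1), count + 1) else (pre, ans, 0)

def check (s : String) : Int :=
  (s.toList.foldl checkStep (false, 0, 0)).2.1

-- ===== PORT B =====
-- state: (runs, cur)
def checkAltStep (st : List Int × Int) (i : Char) : List Int × Int :=
  match st with
  | (runs, cur) =>
    if i = 'O' then (runs, cur + 1)
    else if cur ≠ 0 then (runs ++ [cur], 0) else (runs, cur)

def checkTri (L : Int) : Int := PySem.Int.floordiv (L * (L + 1)) 2

def check_alt (s : String) : Int :=
  let st := s.toList.foldl checkAltStep ([], 0)
  let runs := if st.2 ≠ 0 then st.1 ++ [st.2] else st.1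
  (runs.map checkTri).foldl (· + ·) 0

-- ===== PRECONDITION & SPEC =====
def Spec_check (s : String) (out : Int) : Prop := out = check_alt s
instance (s : String) (out : Int) : Decidable (Spec_check s out) := by unfold Spec_check; infer_instance

-- ===== CLAIM (what is proved, stated in full; the proofs are below) =====
def Claim_equal_check : Prop := ∀ (s : String), Dom_check s → Spec_check s (check s)

-- ===== LEMMAS AND PROOFS =====

def sumTri (runs : List Int) : Int := (runs.map checkTri).foldl (· + ·) 0

theorem sumTri_append (xs : List Int) (c : Int) : sumTri (xs ++ [c]) = sumTri xs + checkTri c := by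
  simp [sumTri, List.foldl_map]

theorem checkTri_zero : checkTri 0 = 0 := by decide

theorem checkTri_succ (c : Int) : checkTri (c + 1) = checkTri c + (c + 1) := by
  unfold checkTri
  have h1 : c * (c + 1) = 2 * ((c * (c + 1)) / 2) := (Int.two_mul_ediv_two_of_even (Int.even_mul_succ_self c)).symm
  have h2 : (c + 1) * (c + 1 + 1) = 2 * ((c * (c + 1)) / 2 + (c + 1)) := by
    linear_combination h1
  rw [h1, h2, PySem.Int.floordiv, PySem.Int.floordiv, Int.mul_fdiv_cancel_left _ (by norm_num), Int.mul_fdiv_cancel_left _ (by norm_num)]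

-- invariant relating A's state to B's state along the fold
def InvAB (a : Bool × Int × Int) (b : List Int × Int) : Prop :=
  a.2.2 = b.2 ∧ (a.1 = false → b.2 = 0) ∧ a.2.1 = sumTri b.1 + checkTri b.2

theorem invAB_step (a : Bool × Int × Int) (b : List Int × Int) (i : Char)
    (h : InvAB a b) : InvAB (checkStep a i) (checkAltStep b i) := by
  obtain ⟨pre, ans, count⟩ := a
  obtain ⟨runs, cur⟩ := b
  obtain ⟨h1, h2, h3⟩ := h
  simp only at h1 h2 h3
  subst h1
  by_cases hO : i = 'O'
  · cases pre <;>
      simp [checkStep, checkAltStep, hO, InvAB, h3, checkTri_succ] <;> ring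
  · cases pre
    · have : count = 0 := h2 rfl
      subst this
      simp [checkStep, checkAltStep, hO, InvAB, h3]
    · by_cases hc : count = 0
      · subst hc; simp [checkStep, checkAltStep, hO, InvAB, h3]
      · simp [checkStep, checkAltStep, hO, hc, InvAB, h3, sumTri_append, checkTri_zero]

theorem invAB_fold (l : List Char) (a : Bool × Int × Int) (b : List Int × Int)
    (h : InvAB a b) : InvAB (l.foldl checkStep a) (l.foldl checkAltStep b) := by
  induction l generalizing a b with
  | nil => exact h
  | cons x xs ih => exact ih _ _ (invAB_step a b x h)

-- ===== VERDICT (by name: the statement is the Claim_ definition above) =====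
theorem check_spec : Claim_equal_check := by
  intro s _
  unfold Spec_check check check_alt
  have h := invAB_fold s.toList (false, 0, 0) ([], 0) (by exact ⟨rfl, fun _ => rfl, by decide⟩)
  obtain ⟨h1, h2, h3⟩ := h
  set a := s.toList.foldl checkStep (false, 0, 0)
  set b := s.toList.foldl checkAltStep ([], 0)
  by_cases hc : b.2 = 0
  · simp only [hc, ne_eq, not_true_eq_false, if_false]
    rw [h3, hc, checkTri_zero, add_zero]; rfl
  · simp only [ne_eq, hc, not_false_eq_true, if_true]
    rw [h3]
    show _ = sumTri (b.1 ++ [b.2])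
    rw [sumTri_append]
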